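-- pv_equiv track=rewrite | github.com/BioDynaMo/biodynamo | util/demo_to_notebook.py | Comments
-- ===== SOURCE A (Python) =====
-- def Comments(text):
-- 	"""
-- 	Converts comments delimited by // and on a new line into a markdown cell.
-- 	>>> Comments('''// This is a
-- 	... // multiline comment
-- 	... void function(){}''')
-- 	'# <markdowncell>\\n# This is a\\n#  multiline comment\\n# <codecell>\\nvoid function(){}\\n'
-- 	>>> Comments('''void function(){
-- 	...    int variable = 5 // Comment not in cell
-- 	...    // Comment also not in cell
-- 	... }''')
-- 	'void function(){\\n   int variable = 5 // Comment not in cell\\n   // Comment also not in cell\\n}\\n'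
-- 	"""
-- 	text = text.splitlines()
-- 	newtext = ''
-- 	inComment = False
--
-- 	for line in text:
-- 		if line.startswith("//") and not inComment:  # True if first line of comment
-- 			inComment = True
-- 			newtext += "# <markdowncell>\n"
-- 			# Don't use .capitalize() if line starts with hash, ie it is a header
-- 			if line[2:].lstrip().startswith("#"):
-- 				newtext += ("# " + line[2:]+"\n")
-- 			else:
-- 				newtext += ("# " + line[2:].lstrip().capitalize()+"\n")
-- 		# True if first line after comment
-- 		elif inComment and not line.startswith("//"):
-- 			inComment = False
-- 			newtext += "# <codecell>\n"
-- 			newtext += (line+"\n")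
-- 		# True if in the middle of a comment block
-- 		elif inComment and line.startswith("//"):
-- 			newtext += ("# " + line[2:] + "\n")
-- 		else:
-- 			newtext += (line+"\n")
--
-- 	return newtext
-- ===== SOURCE B (Python) =====
-- def Comments(text):
--     """Run-based rewrite: scan runs of '//' lines with span-style indices instead of a per-line state flag."""
--     lines = text.splitlines()
--     out = []
--     i = 0
--     n = len(lines)
--     while i < n:
--         if lines[i].startswith("//"):
--             j = i + 1
--             while j < n and lines[j].startswith("//"):
--                 j += 1
--             out.append("# <markdowncell>\n")
--             first = lines[i][2:]
--             if first.lstrip().startswith("#"):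
--                 out.append("# " + first + "\n")
--             else:
--                 out.append("# " + first.lstrip().capitalize() + "\n")
--             for k in range(i + 1, j):
--                 out.append("# " + lines[k][2:] + "\n")
--             if j < n:
--                 out.append("# <codecell>\n")
--             i = j
--         else:
--             out.append(lines[i] + "\n")
--             i += 1
--     return "".join(out)
-- ===== Notes on version B (the rewrite author's own statement) =====
-- stated objective: alternative
-- what changed: Replaced A's per-line fold carrying an inComment flag by a run-based scan: B spans each maximal run of comment-prefixed lines at once (groupby-style), emitting the markdown cell for the whole run and a codecell marker only when code follows, instead of tracking state across iterations.
import Mathlib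
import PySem

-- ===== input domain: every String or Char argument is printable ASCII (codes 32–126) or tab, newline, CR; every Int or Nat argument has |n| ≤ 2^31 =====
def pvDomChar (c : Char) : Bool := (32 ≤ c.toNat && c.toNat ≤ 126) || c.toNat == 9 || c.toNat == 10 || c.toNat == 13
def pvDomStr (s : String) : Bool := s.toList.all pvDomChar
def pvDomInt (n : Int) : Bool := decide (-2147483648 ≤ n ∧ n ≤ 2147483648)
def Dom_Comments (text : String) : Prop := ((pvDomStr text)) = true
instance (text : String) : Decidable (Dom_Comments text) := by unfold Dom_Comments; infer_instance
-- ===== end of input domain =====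

-- B replaces A's per-line inComment flag by a run-based scan over maximal comment runs; objective: alternative decomposition, same cost.

-- shared ports of Python builtins both sources call on a line (line.startswith, line[2:], lstrip, capitalize)
def pvPred (l : List Char) : Bool := PySem.Chars.startswith l ['/', '/']

-- str.capitalize(): first char uppercased, the rest lowercased (exact on the ASCII domain)
def pvCapitalize (cs : List Char) : List Char :=
  match cs with
  | [] => []
  | c :: rest => PySem.Chars.upperChar c :: rest.map PySem.Chars.lowerChar

-- the first comment line: "# " + line[2:] if line[2:].lstrip() starts with '#', else "# " + line[2:].lstrip().capitalize(), plus "\n"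
def pvFmtFirst (l : List Char) : List Char :=
  if PySem.Chars.startswith (PySem.Chars.lstrip (l.drop 2)) ['#'] then
    '#' :: ' ' :: l.drop 2 ++ ['\n']
  else
    '#' :: ' ' :: pvCapitalize (PySem.Chars.lstrip (l.drop 2)) ++ ['\n']

-- a middle comment line: "# " + line[2:] + "\n"
def pvMid (l : List Char) : List Char := '#' :: ' ' :: l.drop 2 ++ ['\n']

def pvMD : List Char := "# <markdowncell>\n".toList
def pvCC : List Char := "# <codecell>\n".toList

-- ===== PORT A =====
-- the body of A's for-loop (the four branches, in order), as the fold step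
def pvStepA (st : List Char × Bool) (l : List Char) : List Char × Bool :=
  if pvPred l && !st.2 then (st.1 ++ pvMD ++ pvFmtFirst l, true)
  else if st.2 && !pvPred l then (st.1 ++ pvCC ++ l ++ ['\n'], false)
  else if st.2 && pvPred l then (st.1 ++ pvMid l, true)
  else (st.1 ++ l ++ ['\n'], false)

def Comments (text : String) : String :=
  let lines := (PySem.Str.splitlines text).map String.toList
  let res := lines.foldl pvStepA ([], false)
  String.ofList res.1

-- ===== PORT B =====
def Comments_altGo : List (List Char) → List Char
  | [] => []
  | l :: ls =>
    if pvPred l then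
      -- span: the rest of the '//' run, then everything after it
      let run := ls.takeWhile pvPred
      let rest := ls.dropWhile pvPred
      pvMD ++ pvFmtFirst l ++ run.foldl (fun a x => a ++ pvMid x) [] ++
        (if rest.isEmpty then [] else pvCC) ++ Comments_altGo rest
    else l ++ ['\n'] ++ Comments_altGo ls
  termination_by ls => ls.length
  decreasing_by
    · exact Nat.lt_succ_of_le (ls.length_dropWhile_le pvPred)
    · exact Nat.lt_succ_self _

def Comments_alt (text : String) : String :=
  String.ofList (Comments_altGo ((PySem.Str.splitlines text).map String.toList))

-- ===== PRECONDITION & SPEC =====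
def Spec_Comments (text : String) (out : String) : Prop := out = Comments_alt text
instance (text : String) (out : String) : Decidable (Spec_Comments text out) := by unfold Spec_Comments; infer_instance

-- ===== CLAIM (what is proved, stated in full; the proofs are below) =====
def Claim_equal_Comments : Prop := ∀ (text : String), Dom_Comments text → Spec_Comments text (Comments text)

-- ===== LEMMAS AND PROOFS =====

-- what A's fold produces while inComment = true: the remaining '//' lines, then "# <codecell>" + line at the first non-comment line
def pvContC : List (List Char) → List Char
  | [] => []
  | l :: ls => if pvPred l then pvMid l ++ pvContC ls else pvCC ++ l ++ '\n' :: Comments_altGo ls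

lemma pvContC_eq_span (ls : List (List Char)) :
    pvContC ls = (ls.takeWhile pvPred).flatMap pvMid ++
      (if (ls.dropWhile pvPred).isEmpty then [] else pvCC) ++ Comments_altGo (ls.dropWhile pvPred) := by
  induction ls with
  | nil => simp [pvContC, Comments_altGo]
  | cons l ls ih =>
    by_cases h : pvPred l
    · simp [pvContC, h, ih]
    · simp only [pvPred] at h
      simp [pvContC, h, Comments_altGo, pvPred]

lemma pvAltGo_comment (l : List Char) (ls : List (List Char)) (h : pvPred l = true) :
    Comments_altGo (l :: ls) = pvMD ++ pvFmtFirst l ++ pvContC ls := by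
  rw [pvContC_eq_span]
  simp only [Comments_altGo, h, if_true, PySem.List.foldl_append_eq_flatMap]
  simp

lemma pvFold_eq (ls : List (List Char)) :
    (∀ acc, (ls.foldl pvStepA (acc, false)).1 = acc ++ Comments_altGo ls) ∧
    (∀ acc, (ls.foldl pvStepA (acc, true)).1 = acc ++ pvContC ls) := by
  induction ls with
  | nil => simp [Comments_altGo, pvContC]
  | cons l ls ih =>
    constructor <;> intro acc <;> by_cases h : pvPred l = true
    · rw [List.foldl_cons, show pvStepA (acc, false) l = (acc ++ pvMD ++ pvFmtFirst l, true) by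
        simp [pvStepA, h], ih.2, pvAltGo_comment l ls h]
      simp
    · rw [List.foldl_cons, show pvStepA (acc, false) l = (acc ++ l ++ ['\n'], false) by
        simp [pvStepA, h], ih.1, Comments_altGo, if_neg (by simp [h])]
      simp
    · rw [List.foldl_cons, show pvStepA (acc, true) l = (acc ++ pvMid l, true) by
        simp [pvStepA, h], ih.2, pvContC, if_pos h]
      simp
    · rw [List.foldl_cons, show pvStepA (acc, true) l = (acc ++ pvCC ++ l ++ ['\n'], false) by
        simp [pvStepA, h], ih.1, pvContC, if_neg (by simp [h])]
      simp

-- ===== VERDICT (by name: the statement is the Claim_ definition above) =====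
theorem Comments_spec : Claim_equal_Comments := by
  intro text _
  show Comments text = Comments_alt text
  show String.ofList (List.foldl pvStepA ([], false)
      ((PySem.Str.splitlines text).map String.toList)).1 = _
  rw [(pvFold_eq ((PySem.Str.splitlines text).map String.toList)).1 [], List.nil_append]
  rfl
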